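-- pv_equiv track=rewrite | github.com/Vkautlya99/Coding-Problems- | IntermediateQuestions/LastNonRepeatingCharacter.py | LastNonRepeatingCharacterInAnString
-- ===== SOURCE A (Python) =====
-- def LastNonRepeatingCharacterInAnString(string):
--     char_count = {}
--
--     for char in string :
--         char_count[char] = char_count.get(char, 0) + 1
--
--     for char in reversed(string) :
--         if char_count[char] == 1:
--             return char
--     return None
-- ===== SOURCE B (Python) =====
-- def LastNonRepeatingCharacterInAnString(string):
--     first_index = {}
--     repeated = set()
--     for i, ch in enumerate(string):
--         if ch in first_index:
--             repeated.add(ch)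
--         else:
--             first_index[ch] = i
--     best = None  # (index, char) with the largest first-index among unique chars
--     for ch, i in first_index.items():
--         if ch not in repeated and (best is None or i > best[0]):
--             best = (i, ch)
--     return best[1] if best is not None else None
-- ===== Notes on version B (the rewrite author's own statement) =====
-- stated objective: alternative
-- what changed: B replaces A's character-count dict plus reverse scan with a single forward pass that records each character's first index and the set of characters that reappear, then selects the unique character with the maximum first index from the index table; no counting and no reverse traversal.
import Mathlib
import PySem

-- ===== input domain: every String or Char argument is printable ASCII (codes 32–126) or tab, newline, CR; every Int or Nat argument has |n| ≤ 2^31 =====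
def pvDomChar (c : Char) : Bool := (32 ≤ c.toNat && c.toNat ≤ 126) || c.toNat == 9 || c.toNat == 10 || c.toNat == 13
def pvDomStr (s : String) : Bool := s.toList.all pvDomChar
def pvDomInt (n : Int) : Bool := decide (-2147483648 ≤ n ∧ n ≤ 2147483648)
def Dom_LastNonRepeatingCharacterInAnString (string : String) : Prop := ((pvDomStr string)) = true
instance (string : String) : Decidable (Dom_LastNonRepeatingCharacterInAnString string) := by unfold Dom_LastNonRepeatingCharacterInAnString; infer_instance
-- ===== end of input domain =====

-- B replaces A's count-dict + reverse scan by a first-index table + duplicate set built in one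
-- forward pass, returning the unique character of maximal first index (objective: alternative).

-- ===== PORT A =====
-- A's second loop: scan reversed(string), return the first char whose count is 1.
-- `char_count[char]` never misses (char is in string), so getD is exact here.
def pvALoop (d : PySem.Dict Char Int) : List Char → Option String
  | [] => none
  | c :: rest => if d.getD c 0 == 1 then some (String.ofList [c]) else pvALoop d rest

def LastNonRepeatingCharacterInAnString (string : String) : Option String :=
  pvALoop (string.toList.foldl (fun d c => d.insert c (d.getD c 0 + 1)) PySem.Dict.empty)
    string.toList.reverse

-- ===== PORT B =====
-- first loop body: record the first index of a fresh char, add reappearing chars to `repeated`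
def pvBStep (st : PySem.Dict Char Int × PySem.Set Char) (p : Int × Char) :
    PySem.Dict Char Int × PySem.Set Char :=
  if st.1.contains p.2 then (st.1, PySem.Set.add st.2 p.2) else (st.1.insert p.2 p.1, st.2)

-- second loop body: keep (index, char) with the largest index among chars not in `repeated`
def pvBSel (repeated : PySem.Set Char) (best : Option (Int × Char)) (e : Char × Int) :
    Option (Int × Char) :=
  if !(PySem.Set.contains repeated e.1)
      && (match best with | none => true | some (j, _) => decide (j < e.2)) then
    some (e.2, e.1)
  else best

-- selection phase: run the second loop over first_index.items, then `best[1] if best else None`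
def pvBFinish (st : PySem.Dict Char Int × PySem.Set Char) : Option String :=
  match st.1.items.foldl (pvBSel st.2) none with
  | some (_, ch) => some (String.ofList [ch])
  | none => none

def LastNonRepeatingCharacterInAnString_alt (string : String) : Option String :=
  pvBFinish ((PySem.List.enumerate string.toList 0).foldl pvBStep
    (PySem.Dict.empty, PySem.Set.empty))

-- ===== PRECONDITION & SPEC =====
def Spec_LastNonRepeatingCharacterInAnString (string : String) (out : Option String) : Prop := out = LastNonRepeatingCharacterInAnString_alt string
instance (string : String) (out : Option String) : Decidable (Spec_LastNonRepeatingCharacterInAnString string out) := by unfold Spec_LastNonRepeatingCharacterInAnString; infer_instance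

-- ===== CLAIM (what is proved, stated in full; the proofs are below) =====
def Claim_equal_LastNonRepeatingCharacterInAnString : Prop := ∀ (string : String), Dom_LastNonRepeatingCharacterInAnString string → Spec_LastNonRepeatingCharacterInAnString string (LastNonRepeatingCharacterInAnString string)

-- ===== LEMMAS AND PROOFS =====

-- A's reverse scan is find? over the reversed list
theorem pvALoop_eq (d : PySem.Dict Char Int) (cs : List Char) :
    pvALoop d cs = (cs.find? (fun c => d.getD c 0 == 1)).map (fun c => String.ofList [c]) := by
  induction cs with
  | nil => rfl
  | cons c rest ih =>
    by_cases h : (d.getD c 0 == 1) = true <;>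
      simp [pvALoop, List.find?, h, ih]

-- the last element of l satisfying p (p true only on chars occurring once) is the last
-- p-element of l's ordered dedup
theorem pvFindLast (p : Char → Bool) (l : List Char)
    (h : ∀ c ∈ l, p c = true → l.count c ≤ 1) :
    l.reverse.find? p = ((PySem.Set.ofList l).filter p).getLast? := by
  induction l using List.reverseRecOn with
  | nil => rfl
  | append_singleton l a ih =>
    have hrec : l.reverse.find? p = ((PySem.Set.ofList l).filter p).getLast? := by
      refine ih (fun c hc hpc => ?_)
      have := h c (List.mem_append_left _ hc) hpc
      simp [List.count_append] at this
      omega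
    rw [List.reverse_append, PySem.Set.ofList_append_singleton]
    simp only [List.reverse_singleton, List.singleton_append, List.find?]
    by_cases hpa : p a = true
    · by_cases hmem : a ∈ l
      · exfalso
        have h2 := h a (by simp) hpa
        have h1 : 0 < l.count a := List.count_pos_iff.mpr hmem
        simp [List.count_append] at h2
        omega
      · rw [PySem.Set.add_of_not_mem (by simpa [PySem.Set.mem_ofList] using hmem)]
        simp [List.filter_append, hpa]
    · rw [Bool.not_eq_true] at hpa
      have hfa : ∀ s : PySem.Set Char, ((if a ∈ s then s else s ++ [a]).filter p).getLast?
          = (s.filter p).getLast? := by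
        intro s
        split
        · rfl
        · simp [List.filter_append, hpa]
      rw [PySem.Set.add_eq_ite]
      simp only [hpa, hrec]
      exact (hfa _).symm

-- the state after B's first pass: keys in first-occurrence order, strictly increasing
-- stored indices below l.length, and `repeated` = chars of count ≥ 2
theorem pvBuild_spec (l : List Char) :
    ((PySem.List.enumerate l 0).foldl pvBStep (PySem.Dict.empty, PySem.Set.empty)).1.items.map (·.1)
        = PySem.Set.ofList l
    ∧ ((PySem.List.enumerate l 0).foldl pvBStep (PySem.Dict.empty, PySem.Set.empty)).1.items.Pairwise
        (fun e f => e.2 < f.2)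
    ∧ (∀ e ∈ ((PySem.List.enumerate l 0).foldl pvBStep (PySem.Dict.empty, PySem.Set.empty)).1.items,
        e.2 < (l.length : Int))
    ∧ (∀ c : Char,
        c ∈ ((PySem.List.enumerate l 0).foldl pvBStep (PySem.Dict.empty, PySem.Set.empty)).2
          ↔ 2 ≤ l.count c) := by
  induction l using List.reverseRecOn with
  | nil =>
    refine ⟨rfl, List.Pairwise.nil, by simp [PySem.List.enumerate_nil, PySem.Dict.empty], ?_⟩
    intro c
    simp [PySem.List.enumerate_nil, PySem.Set.empty, PySem.Dict.empty]
  | append_singleton l a ih =>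
    obtain ⟨h1, h2, h3, h4⟩ := ih
    set st := (PySem.List.enumerate l 0).foldl pvBStep (PySem.Dict.empty, PySem.Set.empty) with hst
    have hkeys : st.1.keys = PySem.Set.ofList l := by
      simpa [PySem.Dict.keys] using h1
    rw [PySem.List.enumerate_append, List.foldl_append]
    simp only [PySem.List.enumerate_cons, PySem.List.enumerate_nil, List.foldl_cons, List.foldl_nil]
    rw [← hst]
    by_cases hmem : a ∈ l
    · have hc : st.1.contains a = true := by
        rw [PySem.Dict.contains_iff_mem_keys, hkeys, PySem.Set.mem_ofList]
        exact hmem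
      have hstep : pvBStep st (0 + ↑l.length, a) = (st.1, PySem.Set.add st.2 a) := by
        unfold pvBStep; rw [hc]; simp
      rw [hstep]
      refine ⟨?_, h2, ?_, ?_⟩
      · rw [h1, PySem.Set.ofList_append_singleton,
          PySem.Set.add_of_mem ((PySem.Set.mem_ofList _ _).mpr hmem)]
      · intro e he
        have := h3 e he
        simp only [List.length_append, List.length_cons, List.length_nil]
        push_cast
        omega
      · intro c
        rw [PySem.Set.mem_add, h4]
        by_cases hca : c = a
        · subst hca
          have hpos : 0 < l.count c := List.count_pos_iff.mpr hmem
          simp [List.count_append]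
          omega
        · simp [List.count_append, Ne.symm hca]
          exact fun h => absurd h hca
    · have hc : st.1.contains a = false := by
        rw [Bool.eq_false_iff]
        intro hcon
        exact hmem ((PySem.Set.mem_ofList _ _).mp
          (hkeys ▸ ((PySem.Dict.contains_iff_mem_keys _ _).mp hcon)))
      have hstep : pvBStep st (0 + ↑l.length, a)
          = (st.1.insert a (0 + ↑l.length), st.2) := by
        unfold pvBStep; rw [hc]; simp
      rw [hstep]
      have hitems : (st.1.insert a ((0 : Int) + ↑l.length)).items
          = st.1.items ++ [(a, (0 : Int) + ↑l.length)] :=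
        PySem.Dict.items_insert_of_not_contains _ _ hc
      refine ⟨?_, ?_, ?_, ?_⟩
      · rw [hitems, List.map_append, h1, PySem.Set.ofList_append_singleton,
          PySem.Set.add_of_not_mem (fun h => hmem ((PySem.Set.mem_ofList _ _).mp h))]
        rfl
      · rw [hitems, List.pairwise_append]
        refine ⟨h2, List.pairwise_singleton _ _, ?_⟩
        intro e he f hf
        have := h3 e he
        simp only [List.mem_singleton] at hf
        subst hf
        simpa using this
      · intro e he
        rw [hitems] at he
        rcases List.mem_append.mp he with h | h
        · have := h3 e h
          simp only [List.length_append, List.length_cons, List.length_nil]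
          push_cast
          omega
        · simp only [List.mem_singleton] at h
          subst h
          simp only [List.length_append, List.length_cons, List.length_nil]
          push_cast
          omega
      · intro c
        rw [h4]
        by_cases hca : c = a
        · subst hca
          have : l.count c = 0 := List.count_eq_zero.mpr hmem
          simp [List.count_append, this]
        · simp [List.count_append, Ne.symm hca]

-- B's selection fold returns the last entry whose char is not in `repeated`
theorem pvBSel_spec (r : PySem.Set Char) (es : List (Char × Int)) (b : Option (Int × Char))
    (hp : es.Pairwise (fun e f => e.2 < f.2))
    (hb : ∀ e ∈ es, ∀ j ch, b = some (j, ch) → j < e.2) :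
    es.foldl (pvBSel r) b
      = match (es.filter (fun e => !(PySem.Set.contains r e.1))).getLast? with
        | none => b
        | some e => some (e.2, e.1) := by
  induction es generalizing b with
  | nil => rfl
  | cons e rest ih =>
    rw [List.pairwise_cons] at hp
    rw [List.foldl_cons, List.filter_cons]
    by_cases hc : PySem.Set.contains r e.1 = true
    · have hstep : pvBSel r b e = b := by
        unfold pvBSel; rw [hc]; simp
      rw [hstep, hc]
      simp only [Bool.not_true, Bool.false_eq_true, if_false]
      exact ih b hp.2 (fun f hf j ch hbj => hb f (List.mem_cons_of_mem _ hf) j ch hbj)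
    · rw [Bool.not_eq_true] at hc
      have hstep : pvBSel r b e = some (e.2, e.1) := by
        cases b with
        | none => unfold pvBSel; rw [hc]; simp
        | some jc =>
          have hlt : jc.1 < e.2 := hb e (List.mem_cons_self ..) jc.1 jc.2 (by rw [Prod.mk.eta])
          unfold pvBSel; rw [hc]; simp [hlt]
      rw [hstep, hc]
      have hrec := ih (some (e.2, e.1)) hp.2
        (fun f hf j ch hbj => by
          have h1 : e.2 = j := congrArg Prod.fst (Option.some.inj hbj)
          exact h1 ▸ hp.1 f hf)
      rw [hrec]
      simp only [Bool.not_false, if_true]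
      rcases hfl : rest.filter (fun e => !(PySem.Set.contains r e.1)) with _ | ⟨x, xs⟩
      · rw [hfl]; simp
      · rw [hfl, List.getLast?_cons_cons]
        rcases hx : (x :: xs).getLast? with _ | f
        · simp at hx
        · rfl

-- ===== VERDICT (by name: the statement is the Claim_ definition above) =====
theorem LastNonRepeatingCharacterInAnString_spec : Claim_equal_LastNonRepeatingCharacterInAnString := by
  unfold Claim_equal_LastNonRepeatingCharacterInAnString
  intro s _
  unfold Spec_LastNonRepeatingCharacterInAnString
  unfold LastNonRepeatingCharacterInAnString LastNonRepeatingCharacterInAnString_alt pvBFinish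
  set l := s.toList with hl
  obtain ⟨h1, h2, h3, h4⟩ := pvBuild_spec l
  set st := (PySem.List.enumerate l 0).foldl pvBStep (PySem.Dict.empty, PySem.Set.empty) with hst
  -- A side: counter dict, then find? on the reversed list, then the last unique of the dedup
  rw [PySem.Dict.foldl_insert_getD_add_one_eq_counter, pvALoop_eq]
  have hpred : (fun c => (PySem.Dict.counter l).getD c 0 == 1)
      = (fun c => l.count c == 1) := by
    funext c
    rw [PySem.Dict.getD_counter]
    by_cases h : l.count c = 1 <;> simp [h]
  rw [hpred, pvFindLast _ l (fun c _ hpc => le_of_eq (by simpa using hpc))]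
  -- B side: selection fold = last non-repeated entry of the items
  rw [pvBSel_spec st.2 st.1.items none h2 (by intro e he j ch h; cases h)]
  have hq : st.1.items.filter (fun e => !(PySem.Set.contains st.2 e.1))
      = st.1.items.filter ((fun c => l.count c == 1) ∘ (·.1)) := by
    refine List.filter_congr ?_
    intro e he
    have hmem : e.1 ∈ l := by
      have hm : e.1 ∈ st.1.items.map (·.1) := List.mem_map_of_mem he
      rw [h1] at hm
      exact (PySem.Set.mem_ofList _ _).mp hm
    have h1le : 1 ≤ l.count e.1 := List.count_pos_iff.mpr hmem
    by_cases hc : PySem.Set.contains st.2 e.1 = true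
    · have h2le := (h4 e.1).mp ((PySem.Set.contains_iff _ _).mp hc)
      have hne : ¬ (l.count e.1 = 1) := by omega
      rw [hc]
      simp [Function.comp, hne]
    · rw [Bool.not_eq_true] at hc
      have hnot : ¬ (2 ≤ l.count e.1) := fun hge => by
        have := (PySem.Set.contains_iff _ _).mpr ((h4 e.1).mpr hge)
        rw [hc] at this
        cases this
      have heq : l.count e.1 = 1 := by omega
      rw [hc]
      simp [Function.comp, heq]
  have hlast : ((PySem.Set.ofList l).filter (fun c => l.count c == 1)).getLast?
      = (st.1.items.filter (fun e => !(PySem.Set.contains st.2 e.1))).getLast?.map (·.1) := by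
    rw [← h1, List.filter_map, List.getLast?_map, hq]
  rw [hlast]
  rcases hL : (st.1.items.filter (fun e => !(PySem.Set.contains st.2 e.1))).getLast? with _ | e
  · rw [hL]
    rfl
  · rw [hL]
    rfl
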